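-- pv_equiv track=rewrite | github.com/TomekWojdyla/pp1 | 09-Test2/Nowy folder/p2.py | f
-- ===== SOURCE A (Python) =====
-- def f(d):
--     lent=len(d)
--     ppl=0
--     for i in range(lent):
--         if d[i]=="+":
--             ppl+=1
--         else:
--             ppl = ppl -1
--     return ppl
-- ===== SOURCE B (Python) =====
-- def f(d):
--     n = len(d)
--     if n == 0:
--         return 0
--     if n == 1:
--         return 1 if d == "+" else -1
--     m = n // 2
--     return f(d[:m]) + f(d[m:])
-- ===== Notes on version B (the rewrite author's own statement) =====
-- stated objective: alternative
-- what changed: Replaces the left-to-right index loop with a running +/-1 accumulator by a divide-and-conquer recursion: split the string at the midpoint, recurse on both halves and add the two results, with base cases empty -> 0 and single character -> +1/-1.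
import Mathlib
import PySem

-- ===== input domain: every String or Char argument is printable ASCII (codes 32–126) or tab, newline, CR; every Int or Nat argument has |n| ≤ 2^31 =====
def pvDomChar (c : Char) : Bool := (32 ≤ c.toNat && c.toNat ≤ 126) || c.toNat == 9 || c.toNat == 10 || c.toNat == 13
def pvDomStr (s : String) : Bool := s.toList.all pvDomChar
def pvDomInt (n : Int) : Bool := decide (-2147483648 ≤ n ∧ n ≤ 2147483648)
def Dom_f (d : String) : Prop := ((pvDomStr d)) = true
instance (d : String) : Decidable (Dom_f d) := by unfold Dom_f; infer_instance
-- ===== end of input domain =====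

-- B replaces A's index loop with a running ±1 accumulator by a midpoint divide-and-conquer recursion (alternative decomposition, same cost).


-- ===== PORT A =====
def f (d : String) : Int :=
  let lent : Int := PySem.Str.len d
  (PySem.List.pyRange 0 lent).foldl
    (fun ppl i => if PySem.Str.pyGet? d i = some '+' then ppl + 1 else ppl - 1) 0

-- ===== PORT B =====
-- recursion over the code points; d[:m] / d[m:] are the PySem slices (exact: bounds are in-range naturals)
def fAltGo (l : List Char) : Int :=
  if l.length = 0 then 0
  else if l.length = 1 then (if l = ['+'] then 1 else -1)
  else
    fAltGo (PySem.List.slice l none (some ((l.length / 2 : Nat) : Int))) +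
    fAltGo (PySem.List.slice l (some ((l.length / 2 : Nat) : Int)) none)
termination_by l.length
decreasing_by
  · rw [PySem.List.slice_to_natCast]
    simp only [List.length_take]
    omega
  · rw [PySem.List.slice_from_natCast]
    simp only [List.length_drop]
    omega

def f_alt (d : String) : Int := fAltGo d.toList

-- ===== PRECONDITION & SPEC =====
def Spec_f (d : String) (out : Int) : Prop := out = f_alt d
instance (d : String) (out : Int) : Decidable (Spec_f d out) := by unfold Spec_f; infer_instance

-- ===== CLAIM (what is proved, stated in full; the proofs are below) =====
def Claim_equal_f : Prop := ∀ (d : String), Dom_f d → Spec_f d (f d)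

-- ===== LEMMAS AND PROOFS =====

/-- The divide-and-conquer recursion computes 2·(#'+') − length. -/
theorem fAltGo_eq (l : List Char) :
    fAltGo l = 2 * (l.count '+' : Int) - l.length := by
  fun_induction fAltGo l with
  | case1 l h0 => -- length = 0
    rcases List.length_eq_zero_iff.mp h0 with rfl; simp
  | case2 h0 h1 => -- length = 1, l = ['+']
    simp
  | case3 l h0 h1 hp => -- length = 1, l ≠ ['+']
    obtain ⟨c, rfl⟩ := List.length_eq_one_iff.mp h1
    have hc : c ≠ '+' := fun h => hp (by simp [h])
    simp [hc]
  | case4 l h0 h1 ih1 ih2 =>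
    rw [ih1, ih2]
    rw [PySem.List.slice_to_natCast, PySem.List.slice_from_natCast] at *
    have hsplit := List.take_append_drop (l.length / 2) l
    have hcount : (l.take (l.length / 2)).count '+' + (l.drop (l.length / 2)).count '+'
        = l.count '+' := by
      conv_rhs => rw [← hsplit]
      rw [List.count_append]
    have hlen : (l.take (l.length / 2)).length + (l.drop (l.length / 2)).length
        = l.length := by
      conv_rhs => rw [← hsplit]
      rw [List.length_append]
    omega

/-- The ±1 accumulator loop over the characters themselves. -/
theorem pm_foldl (l : List Char) (a : Int) :
    l.foldl (fun ppl c => if c = '+' then ppl + 1 else ppl - 1) a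
      = a + 2 * (l.count '+' : Int) - l.length := by
  induction l generalizing a with
  | nil => simp
  | cons x t ih =>
    by_cases hx : x = '+' <;>
      simp [List.foldl_cons, hx, ih] <;> ring

theorem f_spec' (d : String) : f d = f_alt d := by
  unfold f f_alt
  rw [PySem.Str.len_eq, fAltGo_eq]
  set l := d.toList with hl
  have hcg : ∀ (acc : Int) (i : Int), i ∈ PySem.List.pyRange 0 (l.length : Int) →
      (if PySem.Str.pyGet? d i = some '+' then acc + 1 else acc - 1)
        = (if PySem.List.pyGetD l i ' ' = '+' then acc + 1 else acc - 1) := by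
    intro acc i hi
    rw [PySem.List.mem_pyRange_one] at hi
    have hnn : 0 ≤ i := hi.1
    have hlt : i.toNat < l.length := by omega
    have h1 : PySem.Str.pyGet? d i = some (l[i.toNat]) := by
      simp [PySem.Str.pyGet?_eq, PySem.Chars.pyGet?_eq_listPyGet?, ← hl,
        PySem.List.pyGet?_of_nonneg _ hnn, List.getElem?_eq_getElem hlt]
    have h2 : PySem.List.pyGetD l i ' ' = l[i.toNat] := by
      simp [PySem.List.pyGetD_of_nonneg l ' ' hnn, List.getD, List.getElem?_eq_getElem hlt]
    rw [h1, h2]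
    simp
  rw [PySem.List.foldl_congr_mem _ _ _ _ hcg]
  have := PySem.List.foldl_pyRange_pyGetD l ' '
    (fun ppl c => if c = '+' then ppl + 1 else ppl - 1) (0 : Int) (le_refl (0 : Int))
  simp only [PySem.List.len] at this
  rw [this]
  simp [pm_foldl]

-- ===== VERDICT (by name: the statement is the Claim_ definition above) =====
theorem f_spec : Claim_equal_f := by
  intro d _
  unfold Spec_f
  exact f_spec' d
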